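-- pv_equiv track=rewrite | github.com/zwocram/TFS | tfs/utils/corrutil.py | _create_start_end_index_markets
-- ===== SOURCE A (Python) =====
-- import itertools
--
-- def _create_start_end_index_markets(market_count):
--     """
--     Create start and end indices for identifying market
--     members in e.g. correlation matrices.
--
--     Based on a list of available asset classes and the
--     number of markets in those asset classes we create
--     indices with which we can identify those markets and
--     their members in a correlation matrix.
--
--     Parameters
--     ----------
--     market_count: list
--         each member in the list is a tuple.
--             first tuple member: asset class name
--             second tuple member: #markets in asset class
--
--     Returns
--     -------
--     market_index: list
--         each member of the list is a 2d tuple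
--             1st element: start index of asset class range
--             2nd element: end index of asset class range
--
--     """
--
--     cum_markets_count = list(
--         itertools.accumulate([m[1] for m in market_count]))
--     dum_1 = [x-1 for x in cum_markets_count]
--     cum_markets_count.insert(0, 0)
--     dum_2 = cum_markets_count.pop()
--     market_index = list(zip(cum_markets_count, dum_1))
--
--     return market_index
-- ===== SOURCE B (Python) =====
-- def _create_start_end_index_markets(market_count):
--     # Build the ranges back-to-front: first total all counts, then walk the
--     # list in reverse, each range ending where the remaining total ends.
--     remaining = sum(c for _, c in market_count)
--     market_index = []
--     for _, count in reversed(market_count):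
--         market_index.append((remaining - count, remaining - 1))
--         remaining -= count
--     market_index.reverse()
--     return market_index
-- ===== Notes on version B (the rewrite author's own statement) =====
-- stated objective: alternative
-- what changed: Instead of zipping forward prefix sums, B totals the counts once and then constructs the ranges back-to-front over the reversed list, each range ending at the current remaining total minus one, reversing at the end.
import Mathlib
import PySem

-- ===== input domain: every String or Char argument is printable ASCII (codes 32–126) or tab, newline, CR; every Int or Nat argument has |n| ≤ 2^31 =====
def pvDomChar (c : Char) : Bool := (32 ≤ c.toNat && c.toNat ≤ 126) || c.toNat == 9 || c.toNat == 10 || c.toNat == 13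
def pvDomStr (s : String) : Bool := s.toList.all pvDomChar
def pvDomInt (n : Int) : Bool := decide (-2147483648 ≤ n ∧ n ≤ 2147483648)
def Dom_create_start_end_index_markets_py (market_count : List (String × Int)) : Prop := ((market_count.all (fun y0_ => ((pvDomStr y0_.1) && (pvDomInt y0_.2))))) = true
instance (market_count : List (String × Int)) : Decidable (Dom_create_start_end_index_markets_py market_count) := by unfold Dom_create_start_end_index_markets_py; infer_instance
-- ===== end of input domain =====

-- B builds the ranges back-to-front from the total of all counts instead of zipping forward prefix sums (alternative decomposition; return value only).

-- ===== PORT A =====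
-- itertools.accumulate with running sum s (s = 0 at the top call)
def pvAccumFrom (s : Int) : List Int → List Int
  | [] => []
  | x :: xs => (s + x) :: pvAccumFrom (s + x) xs

def create_start_end_index_markets_py (market_count : List (String × Int)) : List (Int × Int) :=
  let cum_markets_count := pvAccumFrom 0 (market_count.map (fun m => m.2))
  let dum_1 := cum_markets_count.map (fun x => x - 1)
  let inserted := 0 :: cum_markets_count       -- cum_markets_count.insert(0, 0)
  let popped := inserted.dropLast              -- cum_markets_count.pop() discards the last element
  let market_index := popped.zip dum_1
  market_index

-- ===== PORT B =====
def create_start_end_index_markets_py_alt (market_count : List (String × Int)) : List (Int × Int) :=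
  let remaining := market_count.foldl (fun a p => a + p.2) 0          -- sum(c for _, c in market_count)
  (market_count.reverse.foldl                                         -- for _, count in reversed(...)
    (fun (st : Int × List (Int × Int)) p =>
      (st.1 - p.2, st.2 ++ [(st.1 - p.2, st.1 - 1)]))
    (remaining, [])).2.reverse                                        -- market_index.reverse()

-- ===== PRECONDITION & SPEC =====
def Spec_create_start_end_index_markets_py (market_count : List (String × Int)) (out : List (Int × Int)) : Prop := out = create_start_end_index_markets_py_alt market_count
instance (market_count : List (String × Int)) (out : List (Int × Int)) : Decidable (Spec_create_start_end_index_markets_py market_count out) := by unfold Spec_create_start_end_index_markets_py; infer_instance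

-- ===== CLAIM (what is proved, stated in full; the proofs are below) =====
def Claim_equal_create_start_end_index_markets_py : Prop := ∀ (market_count : List (String × Int)), Dom_create_start_end_index_markets_py market_count → Spec_create_start_end_index_markets_py market_count (create_start_end_index_markets_py market_count)

-- ===== LEMMAS AND PROOFS =====

-- reference recursion both ports reduce to
def pvRanges (s : Int) : List (String × Int) → List (Int × Int)
  | [] => []
  | p :: rest => (s, s + p.2 - 1) :: pvRanges (s + p.2) rest

theorem pvA_eq_ranges (s : Int) (mc : List (String × Int)) :
    ((s :: pvAccumFrom s (mc.map (fun m => m.2))).dropLast).zip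
      ((pvAccumFrom s (mc.map (fun m => m.2))).map (fun x => x - 1)) = pvRanges s mc := by
  induction mc generalizing s with
  | nil => simp [pvAccumFrom, pvRanges]
  | cons p rest ih =>
    simp only [List.map_cons, pvAccumFrom, pvRanges]
    have h := ih (s + p.2)
    cases hx : pvAccumFrom (s + p.2) (rest.map (fun m => m.2)) with
    | nil => simp_all [List.dropLast]
    | cons y ys =>
      rw [hx] at h
      simpa using h

theorem pvSum_eq (mc : List (String × Int)) (a : Int) :
    mc.foldl (fun a p => a + p.2) a = a + (mc.map (fun p => p.2)).sum := by
  induction mc generalizing a with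
  | nil => simp
  | cons p rest ih => simp [ih]; ring

theorem pvB_foldr (mc : List (String × Int)) (s : Int) (acc : List (Int × Int)) :
    mc.foldr
      (fun p (st : Int × List (Int × Int)) =>
        (st.1 - p.2, st.2 ++ [(st.1 - p.2, st.1 - 1)]))
      (s + (mc.map (fun p => p.2)).sum, acc)
      = (s, acc ++ (pvRanges s mc).reverse) := by
  induction mc generalizing s acc with
  | nil => simp [pvRanges]
  | cons p rest ih =>
    simp only [List.foldr_cons, List.map_cons, List.sum_cons, pvRanges, List.reverse_cons]
    have h := ih (s + p.2) acc
    rw [show s + (p.2 + (rest.map (fun p => p.2)).sum) = s + p.2 + (rest.map (fun p => p.2)).sum by ring, h]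
    simp

-- ===== VERDICT (by name: the statement is the Claim_ definition above) =====
theorem create_start_end_index_markets_py_spec : Claim_equal_create_start_end_index_markets_py := by
  intro mc _
  unfold Spec_create_start_end_index_markets_py
  unfold create_start_end_index_markets_py create_start_end_index_markets_py_alt
  simp only [List.foldl_reverse, pvSum_eq, Int.zero_add]
  have h := pvB_foldr mc 0 []
  simp only [Int.zero_add, List.nil_append] at h
  rw [h]
  simpa using pvA_eq_ranges 0 mc
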